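-- pv_equiv track=rewrite | github.com/faci2000/ASD | zachalny/huffman.py | huffman_len
-- ===== SOURCE A (Python) =====
-- class Node:
--     def __init__(self):
--         self.left=None
--         self.right=None
--         self.val=None
--
-- def add_to_stack(Stack,i,value):
--     Stack[i].val=value
--     while (i//2)>0:
--         if Stack[i//2].val>Stack[i].val:
--             Stack[i//2],Stack[i]=Stack[i],Stack[i//2]
--         else:
--             break
--         i//=2
--
-- def push_down(Cheap,size):
--     temp=1
--     while (temp*2)<size:
--         if Cheap[temp*2].val<Cheap[temp].val:
--             if (Cheap[temp*2].val<Cheap[temp*2+1].val)or((temp*2+1)>=(size)):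
--                 Cheap[temp],Cheap[temp*2]=Cheap[temp*2],Cheap[temp]
--                 temp*=2
--             else:
--                 Cheap[temp],Cheap[temp*2+1]=Cheap[temp*2+1],Cheap[temp]
--                 temp=temp*2+1
--         elif Cheap[temp*2+1].val<Cheap[temp].val and(temp*2+1)<(size):
--             Cheap[temp],Cheap[temp*2+1]=Cheap[temp*2+1],Cheap[temp]
--             temp=temp*2+1
--         else:
--             break
--
-- def almost_dfs_count(node,depth):
--     if node.right==None and node.left==None:
--         return depth*node.val
--     elif node.right!=None and node.left!=None:
--         return almost_dfs_count(node.left,depth+1)+almost_dfs_count(node.right,depth+1)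
--     elif node.left!=None:
--         return almost_dfs_count(node.left,depth+1)
--     else:
--         return almost_dfs_count(node.right,depth+1)
--
-- def huffman_len(Tab):
--     if len(Tab)==1:
--         return Tab[0]
--     Stack=[Node() for i in range(len(Tab)+1)]
--     for i in range(len(Tab)):
--         add_to_stack(Stack,(i+1),Tab[i])
--     length=len(Stack)-1
--     for i in range(length-1):
--         Stack[1],Stack[length-i]=Stack[length-i],Stack[1]
--         push_down(Stack,length-i)
--         item = Node()
--         item.left=Stack[1]
--         item.right=Stack[length-i]
--         item.val=Stack[1].val+Stack[length-i].val
--         Stack.append(item)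
--         Stack[1],Stack[len(Stack)-1]=Stack[len(Stack)-1],Stack[1]
--         push_down(Stack,length-i)
--     return almost_dfs_count(Stack[1],0)
-- ===== SOURCE B (Python) =====
-- def huffman_len(Tab):
--     if len(Tab) == 1:
--         return Tab[0]
--     vals = list(Tab)
--     total = 0
--     while len(vals) > 1:
--         vals.sort()
--         x = vals.pop(0)
--         y = vals.pop(0)
--         s = x + y
--         total += s
--         vals.append(s)
--     return total
-- ===== Notes on version B (the rewrite author's own statement) =====
-- stated objective: simpler
-- what changed: Replaces A's hand-rolled binary heap plus explicit Huffman tree construction and recursive depth-weighted traversal by a short sort/pop-two/push-sum loop that accumulates the merged-pair sums directly (total Huffman length = sum of all merged node values), so B builds no tree and no heap.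
import Mathlib
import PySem

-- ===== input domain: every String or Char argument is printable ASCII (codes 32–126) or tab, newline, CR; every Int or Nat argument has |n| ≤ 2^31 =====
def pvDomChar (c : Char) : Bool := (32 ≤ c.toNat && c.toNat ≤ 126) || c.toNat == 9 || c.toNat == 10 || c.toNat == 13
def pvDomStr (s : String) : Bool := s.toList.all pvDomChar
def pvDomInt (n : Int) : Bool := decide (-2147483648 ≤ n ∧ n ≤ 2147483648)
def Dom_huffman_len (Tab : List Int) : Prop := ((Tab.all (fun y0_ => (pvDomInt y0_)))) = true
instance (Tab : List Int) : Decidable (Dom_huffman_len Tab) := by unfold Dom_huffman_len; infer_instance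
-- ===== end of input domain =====

-- B replaces A's hand-rolled binary heap + explicit Huffman tree + recursive depth-weighted count
-- by a plain sort/pop-two/push-sum loop accumulating merged-pair sums (objective: simpler).


-- ===== PORT A =====
-- class Node: left, right, val (all initially None)
inductive PyNode : Type
  | none : PyNode                                -- Python None
  | node : PyNode → PyNode → Option Int → PyNode -- a Node object: left, right, val
deriving DecidableEq, Repr

-- Node() : a fresh node with left = right = val = None
def pvFresh : PyNode := PyNode.node .none .none Option.none

-- reads .val of a node; wherever A compares or adds vals they are ints (0 is never read)
def pvGv : PyNode → Int
  | .node _ _ (some v) => v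
  | _ => 0

-- Stack[i], Stack[i]=… : indices A uses are always in range (default never read)
def pvAt (st : List PyNode) (i : Nat) : PyNode := st.getD i .none

-- Stack[i],Stack[j] = Stack[j],Stack[i]
def pvSwap (st : List PyNode) (i j : Nat) : List PyNode :=
  (st.set i (pvAt st j)).set j (pvAt st i)

-- the while-loop of add_to_stack (sift up); terminates because i strictly decreases
def pvSiftUp (st : List PyNode) (i : Nat) : List PyNode :=
  if h : 0 < i / 2 then
    if pvGv (pvAt st i) < pvGv (pvAt st (i / 2)) then    -- Stack[i//2].val > Stack[i].val
      pvSiftUp (pvSwap st (i / 2) i) (i / 2)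
    else st
  else st
  termination_by i
  decreasing_by exact Nat.div_lt_self (by omega) (by omega)

-- add_to_stack(Stack, i, value)
def pvAddToStack (st : List PyNode) (i : Nat) (value : Int) : List PyNode :=
  let st1 := st.set i (match pvAt st i with                 -- Stack[i].val = value
    | .node l r _ => PyNode.node l r (some value)
    | .none => .none)                                      -- (never hit: A only sets val on Node objects)
  pvSiftUp st1 i

-- push_down(Cheap, size); the while loop as fuel recursion (temp at least doubles each
-- iteration, so any fuel ≥ size makes the port run the loop to its Python exit condition)
def pvPushDown (size : Nat) : List PyNode → Nat → Nat → List PyNode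
  | st, _, 0 => st
  | st, temp, fuel + 1 =>
    if temp * 2 < size then
      if pvGv (pvAt st (temp * 2)) < pvGv (pvAt st temp) then
        if pvGv (pvAt st (temp * 2)) < pvGv (pvAt st (temp * 2 + 1)) ∨ size ≤ temp * 2 + 1 then
          pvPushDown size (pvSwap st temp (temp * 2)) (temp * 2) fuel
        else
          pvPushDown size (pvSwap st temp (temp * 2 + 1)) (temp * 2 + 1) fuel
      else if pvGv (pvAt st (temp * 2 + 1)) < pvGv (pvAt st temp) ∧ temp * 2 + 1 < size then
        pvPushDown size (pvSwap st temp (temp * 2 + 1)) (temp * 2 + 1) fuel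
      else st
    else st

-- almost_dfs_count(node, depth), branch for branch
def pvDfsCount : PyNode → Int → Int
  | .none, _ => 0                                          -- (Python would crash; A never passes None)
  | .node .none .none v, depth => depth * v.getD 0         -- leaf: depth*node.val (val is an int here)
  | .node (.node a b c) (.node d e f) _, depth =>
      pvDfsCount (.node a b c) (depth + 1) + pvDfsCount (.node d e f) (depth + 1)
  | .node (.node a b c) .none _, depth => pvDfsCount (.node a b c) (depth + 1)
  | .node .none r _, depth => pvDfsCount r (depth + 1)

-- one iteration of the merge loop (body of `for i in range(length-1)`)
def pvMergeStep (length : Nat) (st : List PyNode) (i : Nat) : List PyNode :=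
  let size := length - i
  let st1 := pvSwap st 1 size                              -- Stack[1],Stack[length-i] = …
  let st2 := pvPushDown size st1 1 size                    -- push_down(Stack, length-i)
  let item := PyNode.node (pvAt st2 1) (pvAt st2 size)     -- item.left, item.right
      (some (pvGv (pvAt st2 1) + pvGv (pvAt st2 size)))    -- item.val = Stack[1].val+Stack[length-i].val
  let st3 := st2 ++ [item]                                 -- Stack.append(item)
  let st4 := pvSwap st3 1 (st3.length - 1)                 -- Stack[1],Stack[len(Stack)-1] = …
  pvPushDown size st4 1 size                               -- push_down(Stack, length-i)

def huffman_len (Tab : List Int) : Int :=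
  if Tab.length = 1 then Tab.getD 0 0
  else
    let st0 : List PyNode := List.replicate (Tab.length + 1) pvFresh
    let st1 := (List.range Tab.length).foldl
      (fun st i => pvAddToStack st (i + 1) (Tab.getD i 0)) st0
    let length := st1.length - 1
    let stF := (List.range (length - 1)).foldl (pvMergeStep length) st1
    pvDfsCount (pvAt stF 1) 0

-- ===== PORT B =====
-- the while-loop; fuel = initial length is enough (the list shrinks by one per iteration)
def pvBLoop : List Int → Int → Nat → Int
  | _, total, 0 => total
  | vals, total, fuel + 1 =>
    if 1 < vals.length then
      match PySem.List.sorted vals id with                 -- vals.sort()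
      | x :: y :: rest => pvBLoop (rest ++ [x + y]) (total + (x + y)) fuel
                                                           -- x=pop(0); y=pop(0); total+=x+y; append(x+y)
      | _ => total                                         -- unreachable: sorting keeps the length > 1
    else total

def huffman_len_alt (Tab : List Int) : Int :=
  if Tab.length = 1 then Tab.getD 0 0
  else pvBLoop Tab 0 Tab.length

-- ===== PRECONDITION & SPEC =====
-- Pre_ excludes only the empty list, on which A raises IndexError (reads Stack[1] of a 1-element list).
def Pre_huffman_len (Tab : List Int) : Prop := Tab ≠ []
instance (Tab : List Int) : Decidable (Pre_huffman_len Tab) := by unfold Pre_huffman_len; infer_instance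
def pvWitness_huffman_len : List Int := [3, 1, 2]

def Spec_huffman_len (Tab : List Int) (out : Int) : Prop := out = huffman_len_alt Tab
instance (Tab : List Int) (out : Int) : Decidable (Spec_huffman_len Tab out) := by unfold Spec_huffman_len; infer_instance

-- ===== CLAIM (what is proved, stated in full; the proofs are below) =====
def Claim_equal_huffman_len : Prop := ∀ (Tab : List Int), Dom_huffman_len Tab → Pre_huffman_len Tab → Spec_huffman_len Tab (huffman_len Tab)

-- ===== LEMMAS AND PROOFS =====

-- value at an index
def pvV (st : List PyNode) (i : Nat) : Int := pvGv (pvAt st i)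

-- the heap region: the nodes at indices 1..size
def pvReg (st : List PyNode) (size : Nat) : List PyNode :=
  (List.range' 1 size).map (fun j => pvAt st j)

-- min-heap property on indices 1..size
def pvHeap (st : List PyNode) (size : Nat) : Prop :=
  ∀ j, 2 ≤ j → j ≤ size → pvV st (j / 2) ≤ pvV st j

-- well-formed tree: every node carries an int val; internal vals are the sums of the children
def pvWfB : PyNode → Bool
  | .node .none .none (some _) => true
  | .node (.node a b c) (.node d e f) (some v) =>
      pvWfB (.node a b c) && pvWfB (.node d e f) &&
        decide (v = pvGv (.node a b c) + pvGv (.node d e f))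
  | _ => false

-- sum of the vals of the internal (merge-created) nodes of a tree
def pvIS : PyNode → Int
  | .node (.node a b c) (.node d e f) (some v) => pvIS (.node a b c) + pvIS (.node d e f) + v
  | _ => 0

-- the accumulator-free form of B's loop
def pvT : Nat → List Int → Int
  | 0, _ => 0
  | fuel + 1, l =>
    if 1 < l.length then
      match PySem.List.sorted l id with
      | x :: y :: rest => (x + y) + pvT fuel (rest ++ [x + y])
      | _ => 0
    else 0

def pvLeaf (v : Int) : PyNode := PyNode.node .none .none (some v)

lemma pvBLoop_eq (fuel : Nat) : ∀ (l : List Int) (tot : Int),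
    pvBLoop l tot fuel = tot + pvT fuel l := by
  induction fuel with
  | zero => intro l tot; simp [pvBLoop, pvT]
  | succ f ih =>
    intro l tot
    by_cases h : 1 < l.length
    · simp only [pvBLoop, pvT, h, if_pos]
      rcases hs : PySem.List.sorted l id with _ | ⟨x, _ | ⟨y, rest⟩⟩
      · simp
      · simp
      · dsimp only; rw [ih]; ring
    · simp [pvBLoop, pvT, h]

lemma pvSorted_eq_of_perm {l l' : List Int} (h : l.Perm l') :
    PySem.List.sorted l id = PySem.List.sorted l' id := by
  exact PySem.List.sorted_eq_sorted_of_perm l l' id (fun _ _ a => a) h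

lemma pvT_perm (fuel : Nat) {l l' : List Int} (h : l.Perm l') : pvT fuel l = pvT fuel l' := by
  cases fuel with
  | zero => rfl
  | succ f => simp only [pvT, h.length_eq, pvSorted_eq_of_perm h]

lemma pvSwap_length (st : List PyNode) (i j : Nat) : (pvSwap st i j).length = st.length := by
  simp [pvSwap]

lemma pvAt_swap (st : List PyNode) (i j k : Nat) (hi : i < st.length) (hj : j < st.length) :
    pvAt (pvSwap st i j) k =
      if k = j then pvAt st i else if k = i then pvAt st j else pvAt st k := by
  unfold pvSwap pvAt
  rcases eq_or_ne k j with rfl | hkj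
  · rw [if_pos rfl]
    rw [List.getD_eq_getElem?_getD, List.getElem?_set, if_pos rfl, if_pos (by simpa using hj)]
    rfl
  · rw [if_neg hkj]
    rw [List.getD_eq_getElem?_getD, List.getElem?_set, if_neg (fun h => hkj h.symm)]
    rcases eq_or_ne k i with rfl | hki
    · rw [if_pos rfl]
      rw [List.getElem?_set, if_pos rfl, if_pos hi]
      rfl
    · rw [if_neg hki, List.getElem?_set, if_neg (fun h => hki h.symm), List.getD_eq_getElem?_getD]

lemma pvReg_length (st : List PyNode) (size : Nat) : (pvReg st size).length = size := by
  simp [pvReg]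

lemma pvReg_getElem (st : List PyNode) (size p : Nat) (hp : p < size) :
    (pvReg st size)[p]'(by simpa [pvReg_length] using hp) = pvAt st (p + 1) := by
  simp [pvReg, Nat.add_comm]

lemma pvReg_congr (st st' : List PyNode) (size : Nat)
    (h : ∀ k, 1 ≤ k → k ≤ size → pvAt st k = pvAt st' k) : pvReg st size = pvReg st' size := by
  apply List.map_congr_left
  intro k hk
  rw [List.mem_range'] at hk
  exact h k (by omega) (by omega)

lemma pvReg_succ (st : List PyNode) (size : Nat) :
    pvReg st (size + 1) = pvReg st size ++ [pvAt st (size + 1)] := by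
  simp [pvReg, List.range'_concat, Nat.add_comm]

lemma pvReg_swap_perm (st : List PyNode) (i j size : Nat)
    (hi1 : 1 ≤ i) (hi2 : i ≤ size) (hj1 : 1 ≤ j) (hj2 : j ≤ size)
    (hli : i < st.length) (hlj : j < st.length) :
    (pvReg (pvSwap st i j) size).Perm (pvReg st size) := by
  have hi' : i - 1 < (pvReg st size).length := by rw [pvReg_length]; omega
  have hj' : j - 1 < (pvReg st size).length := by rw [pvReg_length]; omega
  have hEq : pvReg (pvSwap st i j) size =
      (((pvReg st size).set (i - 1) ((pvReg st size)[j - 1]'hj')).set (j - 1)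
        ((pvReg st size)[i - 1]'hi')) := by
    apply List.ext_getElem
    · simp [pvReg_length]
    · intro p h1 h2
      have hp : p < size := by simpa [pvReg_length, pvSwap_length] using h1
      rw [pvReg_getElem _ _ _ hp]
      rw [pvAt_swap st i j (p + 1) hli hlj]
      have e1 : (pvReg st size)[j - 1]'hj' = pvAt st j := by
        rw [pvReg_getElem st size (j - 1) (by omega)]; congr 1; omega
      have e2 : (pvReg st size)[i - 1]'hi' = pvAt st i := by
        rw [pvReg_getElem st size (i - 1) (by omega)]; congr 1; omega
      rw [List.getElem_set, List.getElem_set]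
      split_ifs <;> first
        | exact e2.symm
        | exact e1.symm
        | exact (pvReg_getElem st size p hp).symm
        | omega
  rw [hEq]
  exact List.set_set_perm hi' hj'

lemma pvHeap_min (st : List PyNode) (size : Nat) (h : pvHeap st size) :
    ∀ j, 1 ≤ j → j ≤ size → pvV st 1 ≤ pvV st j := by
  intro j
  induction j using Nat.strong_induction_on with
  | _ j ih =>
    intro hj1 hj2
    rcases Nat.lt_or_ge j 2 with hj | hj
    · have : j = 1 := by omega
      simp [this]
    · calc pvV st 1 ≤ pvV st (j / 2) := ih (j / 2) (by omega) (by omega) (by omega)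
        _ ≤ pvV st j := h j hj hj2

lemma pvMin_head {x h : Int} {l t : List Int}
    (hmem : x ∈ l) (hmin : ∀ y ∈ l, x ≤ y)
    (hperm : l.Perm (h :: t)) (hsorted : (h :: t).Pairwise (· ≤ ·)) : x = h := by
  have hx : x ∈ h :: t := hperm.mem_iff.mp hmem
  have h1 : x ≤ h := hmin h (hperm.mem_iff.mpr (by simp))
  rcases List.mem_cons.mp hx with h2 | h2
  · exact h2
  · exact le_antisymm h1 ((List.pairwise_cons.mp hsorted).1 x h2)

lemma pvDfs_eq (t : PyNode) (hw : pvWfB t = true) :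
    ∀ d, pvDfsCount t d = d * pvGv t + pvIS t := by
  induction t with
  | none => simp [pvWfB] at hw
  | node l r v ihl ihr =>
    intro d
    rcases l with _ | ⟨ll, lr, lv⟩ <;> rcases r with _ | ⟨rl, rr, rv⟩ <;>
      rcases v with _ | v <;>
      simp only [pvWfB, Bool.and_eq_true, decide_eq_true_eq] at hw <;>
      try simp at hw
    · simp [pvDfsCount, pvGv, pvIS]
    · obtain ⟨⟨hwl, hwr⟩, hv⟩ := hw
      simp only [pvDfsCount]
      rw [ihl hwl, ihr hwr]
      simp only [pvGv, pvIS, hv]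
      ring

lemma pvWf_item {x y : PyNode} (hx : pvWfB x = true) (hy : pvWfB y = true) :
    pvWfB (PyNode.node x y (some (pvGv x + pvGv y))) = true ∧
    pvIS (PyNode.node x y (some (pvGv x + pvGv y))) = pvIS x + pvIS y + (pvGv x + pvGv y) := by
  rcases x with _ | ⟨xl, xr, xv⟩
  · simp [pvWfB] at hx
  rcases y with _ | ⟨yl, yr, yv⟩
  · simp [pvWfB] at hy
  constructor
  · simp [pvWfB, hx, hy]
  · simp [pvIS]

lemma pvAt_set (st : List PyNode) (i k : Nat) (x : PyNode) (hi : i < st.length) :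
    pvAt (st.set i x) k = if k = i then x else pvAt st k := by
  unfold pvAt
  rcases eq_or_ne k i with rfl | hki
  · rw [if_pos rfl, List.getD_eq_getElem?_getD, List.getElem?_set, if_pos rfl, if_pos hi]
    rfl
  · rw [if_neg hki, List.getD_eq_getElem?_getD, List.getElem?_set,
      if_neg (fun h => hki h.symm), List.getD_eq_getElem?_getD]

lemma pvV_swap (st : List PyNode) (i j k : Nat) (hi : i < st.length) (hj : j < st.length) :
    pvV (pvSwap st i j) k =
      if k = j then pvV st i else if k = i then pvV st j else pvV st k := by
  unfold pvV
  rw [pvAt_swap st i j k hi hj]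
  split_ifs <;> rfl

-- invariant step for the sift-down: swapping the sinking node at `temp` with its smaller
-- child `c` re-establishes the almost-heap hypotheses one level further down
lemma pvSink_step (st : List PyNode) (size temp c : Nat)
    (h1 : 1 ≤ temp) (h2 : temp < size) (hsz : size < st.length)
    (hc2 : c / 2 = temp) (hc : c < size)
    (hle : pvV st c ≤ pvV st temp)
    (hsib : ∀ s, 2 ≤ s → s < size → s / 2 = temp → pvV st c ≤ pvV st s)
    (hA : ∀ j, 2 ≤ j → j < size → j / 2 ≠ temp → pvV st (j / 2) ≤ pvV st j)
    (hB : ∀ j, 2 ≤ j → j < size → j / 2 = temp → 2 ≤ temp → pvV st (temp / 2) ≤ pvV st j) :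
    (∀ j, 2 ≤ j → j < size → j / 2 ≠ c →
        pvV (pvSwap st temp c) (j / 2) ≤ pvV (pvSwap st temp c) j) ∧
    (∀ j, 2 ≤ j → j < size → j / 2 = c → 2 ≤ c →
        pvV (pvSwap st temp c) (c / 2) ≤ pvV (pvSwap st temp c) j) := by
  have htl : temp < st.length := by omega
  have hcl : c < st.length := by omega
  have hW : ∀ k, pvV (pvSwap st temp c) k =
      if k = c then pvV st temp else if k = temp then pvV st c else pvV st k :=
    fun k => pvV_swap st temp c k htl hcl
  have hct : temp < c := by omega
  constructor
  · intro j hj2 hjs hjc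
    rcases eq_or_ne j c with rfl | hjc'
    · -- pair (temp, c): the swapped pair itself
      rw [hW, hW, hc2, if_neg (by omega), if_pos rfl, if_pos rfl]
      exact hle
    · rcases eq_or_ne j temp with rfl | hjt
      · -- pair (temp/2, temp): grandparent bound
        rw [hW, hW, if_neg (by omega), if_neg (by omega), if_neg hjc', if_pos rfl]
        exact hB c (by omega) hc hc2 hj2
      · rcases eq_or_ne (j / 2) temp with hpt | hpt
        · -- sibling of c under temp
          rw [hW, hW, hpt, if_neg (by omega), if_pos rfl, if_neg hjc', if_neg hjt]
          exact hsib j hj2 hjs hpt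
        · -- pair untouched by the swap
          have hpc : j / 2 ≠ c := hjc
          rw [hW, hW, if_neg hpc, if_neg hpt, if_neg hjc', if_neg hjt]
          exact hA j hj2 hjs hpt
  · intro j hj2 hjs hjc _
    -- children of c: their new grandparent value is the old value of c
    have hj' : c < j := by omega
    rw [hW, hW, hc2, if_neg (by omega), if_pos rfl, if_neg (by omega), if_neg (by omega)]
    have := hA j hj2 hjs (by omega)
    rw [hjc] at this
    exact this

lemma pvPushDown_spec : ∀ (fuel : Nat) (st : List PyNode) (temp size : Nat),
    1 ≤ temp → temp < size → size < st.length → size ≤ fuel + temp →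
    (∀ j, 2 ≤ j → j < size → j / 2 ≠ temp → pvV st (j / 2) ≤ pvV st j) →
    (∀ j, 2 ≤ j → j < size → j / 2 = temp → 2 ≤ temp → pvV st (temp / 2) ≤ pvV st j) →
    (pvPushDown size st temp fuel).length = st.length ∧
    (∀ k, k = 0 ∨ size ≤ k → pvAt (pvPushDown size st temp fuel) k = pvAt st k) ∧
    (pvReg (pvPushDown size st temp fuel) (size - 1)).Perm (pvReg st (size - 1)) ∧
    pvHeap (pvPushDown size st temp fuel) (size - 1) := by
  intro fuel
  induction fuel with
  | zero => intro st temp size h1 h2 _ h4 _ _; omega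
  | succ fuel ih =>
    intro st temp size h1 h2 hsz hfuel hA hB
    rw [pvPushDown]
    by_cases hlo : temp * 2 < size
    · rw [if_pos hlo]
      have hswap : ∀ c, c / 2 = temp → c < size →
          pvV st c ≤ pvV st temp →
          (∀ s, 2 ≤ s → s < size → s / 2 = temp → pvV st c ≤ pvV st s) →
          (pvPushDown size (pvSwap st temp c) c fuel).length = st.length ∧
          (∀ k, k = 0 ∨ size ≤ k →
            pvAt (pvPushDown size (pvSwap st temp c) c fuel) k = pvAt st k) ∧
          (pvReg (pvPushDown size (pvSwap st temp c) c fuel) (size - 1)).Perm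
            (pvReg st (size - 1)) ∧
          pvHeap (pvPushDown size (pvSwap st temp c) c fuel) (size - 1) := by
        intro c hc2 hc hle hsib
        have hstep := pvSink_step st size temp c h1 h2 hsz hc2 hc hle hsib hA hB
        have hlen : (pvSwap st temp c).length = st.length := pvSwap_length st temp c
        have := ih (pvSwap st temp c) c size (by omega) hc (by omega) (by omega)
          hstep.1 hstep.2
        obtain ⟨l1, l2, l3, l4⟩ := this
        refine ⟨by omega, ?_, ?_, l4⟩
        · intro k hk
          rw [l2 k hk, pvAt_swap st temp c k (by omega) (by omega),
            if_neg (by omega), if_neg (by omega)]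
        · exact l3.trans (pvReg_swap_perm st temp c (size - 1)
            h1 (by omega) (by omega) (by omega) (by omega) (by omega))
      by_cases hlt : pvGv (pvAt st (temp * 2)) < pvGv (pvAt st temp)
      · rw [if_pos hlt]
        by_cases hsel : pvGv (pvAt st (temp * 2)) < pvGv (pvAt st (temp * 2 + 1)) ∨
            size ≤ temp * 2 + 1
        · rw [if_pos hsel]
          refine hswap (temp * 2) (by omega) hlo (le_of_lt hlt) ?_
          intro s hs2 hss hsp
          have : s = temp * 2 ∨ s = temp * 2 + 1 := by omega
          rcases this with rfl | rfl
          · exact le_refl _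
          · rcases hsel with h | h
            · exact le_of_lt h
            · omega
        · rw [if_neg hsel]
          rw [not_or, not_lt, not_le] at hsel
          refine hswap (temp * 2 + 1) (by omega) (by omega) ?_ ?_
          · exact le_trans hsel.1 (le_of_lt hlt)
          · intro s hs2 hss hsp
            have : s = temp * 2 ∨ s = temp * 2 + 1 := by omega
            rcases this with rfl | rfl
            · exact hsel.1
            · exact le_refl _
      · rw [if_neg hlt]
        by_cases hsel : pvGv (pvAt st (temp * 2 + 1)) < pvGv (pvAt st temp) ∧
            temp * 2 + 1 < size
        · rw [if_pos hsel]
          refine hswap (temp * 2 + 1) (by omega) hsel.2 (le_of_lt hsel.1) ?_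
          intro s hs2 hss hsp
          have : s = temp * 2 ∨ s = temp * 2 + 1 := by omega
          rcases this with rfl | rfl
          · exact le_trans (le_of_lt hsel.1) (le_of_not_gt hlt)
          · exact le_refl _
        · rw [if_neg hsel]
          refine ⟨rfl, fun k _ => rfl, List.Perm.refl _, ?_⟩
          intro j hj2 hjs
          rcases eq_or_ne (j / 2) temp with hpt | hpt
          · have : j = temp * 2 ∨ j = temp * 2 + 1 := by omega
            rcases this with rfl | rfl
            · have e : temp * 2 / 2 = temp := by omega
              unfold pvV
              rw [e]
              omega
            · rw [hpt]
              by_cases hin : temp * 2 + 1 < size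
              · by_contra hcon
                exact hsel ⟨by unfold pvV at hcon; omega, hin⟩
              · omega
          · exact hA j hj2 (by omega) hpt
    · rw [if_neg hlo]
      refine ⟨rfl, fun k _ => rfl, List.Perm.refl _, ?_⟩
      intro j hj2 hjs
      exact hA j hj2 (by omega) (by omega)

-- invariant step for the sift-up: swapping the rising node at `i` with its parent
lemma pvLift_step (st : List PyNode) (n i : Nat)
    (h2 : 2 ≤ i) (hi : i ≤ n) (hn : n < st.length)
    (hlt : pvV st i < pvV st (i / 2))
    (hA : ∀ j, 2 ≤ j → j ≤ n → j ≠ i → pvV st (j / 2) ≤ pvV st j)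
    (hC : ∀ j, 2 ≤ j → j ≤ n → j / 2 = i → 2 ≤ i → pvV st (i / 2) ≤ pvV st j) :
    (∀ j, 2 ≤ j → j ≤ n → j ≠ i / 2 →
        pvV (pvSwap st (i / 2) i) (j / 2) ≤ pvV (pvSwap st (i / 2) i) j) ∧
    (∀ j, 2 ≤ j → j ≤ n → j / 2 = i / 2 → 2 ≤ i / 2 →
        pvV (pvSwap st (i / 2) i) (i / 2 / 2) ≤ pvV (pvSwap st (i / 2) i) j) := by
  have hpl : i / 2 < st.length := by omega
  have hil : i < st.length := by omega
  have hW : ∀ k, pvV (pvSwap st (i / 2) i) k =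
      if k = i then pvV st (i / 2) else if k = i / 2 then pvV st i else pvV st k :=
    fun k => pvV_swap st (i / 2) i k hpl hil
  constructor
  · intro j hj2 hjn hjp
    rcases eq_or_ne j i with rfl | hji
    · -- the swapped pair (i/2, i) itself
      rw [hW, hW, if_neg (by omega), if_pos rfl, if_pos rfl]
      exact le_of_lt hlt
    · rcases eq_or_ne (j / 2) (i / 2) with hps | hps
      · -- sibling of i under i/2
        rw [hW, hW, hps, if_neg (by omega), if_pos rfl, if_neg hji, if_neg hjp]
        exact le_trans (le_of_lt hlt) (by rw [← hps]; exact hA j hj2 hjn hji)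
      · rcases eq_or_ne (j / 2) i with hpi | hpi
        · -- child of i: its new parent value is the old value of i/2
          rw [hW, hW, hpi, if_pos rfl, if_neg hji, if_neg hjp]
          exact hC j hj2 hjn hpi h2
        · -- pair untouched by the swap
          rw [hW, hW, if_neg hpi, if_neg hps, if_neg hji, if_neg hjp]
          exact hA j hj2 hjn hji
  · intro j hj2 hjn hjp hp2
    have hpp : i / 2 / 2 < i / 2 := by omega
    rw [hW]
    rw [if_neg (by omega), if_neg (by omega)]
    have base : pvV st (i / 2 / 2) ≤ pvV st (i / 2) := by
      have := hA (i / 2) hp2 (by omega) (by omega)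
      exact this
    rcases eq_or_ne j i with rfl | hji
    · rw [hW, if_pos rfl]
      exact base
    · rw [hW, if_neg hji, if_neg (by omega)]
      refine le_trans base ?_
      have := hA j hj2 hjn hji
      rw [hjp] at this
      exact this

lemma pvSiftUp_spec : ∀ (i : Nat) (st : List PyNode) (n : Nat),
    1 ≤ i → i ≤ n → n < st.length →
    (∀ j, 2 ≤ j → j ≤ n → j ≠ i → pvV st (j / 2) ≤ pvV st j) →
    (∀ j, 2 ≤ j → j ≤ n → j / 2 = i → 2 ≤ i → pvV st (i / 2) ≤ pvV st j) →
    (pvSiftUp st i).length = st.length ∧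
    (∀ k, k = 0 ∨ n < k → pvAt (pvSiftUp st i) k = pvAt st k) ∧
    (pvReg (pvSiftUp st i) n).Perm (pvReg st n) ∧ pvHeap (pvSiftUp st i) n := by
  intro i
  induction i using Nat.strong_induction_on with
  | _ i ih =>
    intro st n h1 hn hln hA hC
    rw [pvSiftUp]
    by_cases hp : 0 < i / 2
    · rw [dif_pos hp]
      by_cases hlt : pvGv (pvAt st i) < pvGv (pvAt st (i / 2))
      · rw [if_pos hlt]
        have h2 : 2 ≤ i := by omega
        have hstep := pvLift_step st n i h2 hn hln hlt hA hC
        obtain ⟨l1, l2, l3, l4⟩ := ih (i / 2) (by omega) (pvSwap st (i / 2) i) n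
          (by omega) (by omega) (by rw [pvSwap_length]; exact hln) hstep.1 hstep.2
        refine ⟨by rw [l1, pvSwap_length], ?_, ?_, l4⟩
        · intro k hk
          rw [l2 k hk, pvAt_swap st (i / 2) i k (by omega) (by omega),
            if_neg (by omega), if_neg (by omega)]
        · exact l3.trans (pvReg_swap_perm st (i / 2) i n (by omega) (by omega) h1 hn
            (by omega) (by omega))
      · rw [if_neg hlt]
        refine ⟨rfl, fun k _ => rfl, List.Perm.refl _, ?_⟩
        intro j hj2 hjn
        rcases eq_or_ne j i with rfl | hji
        · unfold pvV; omega
        · exact hA j hj2 hjn hji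
    · rw [dif_neg hp]
      refine ⟨rfl, fun k _ => rfl, List.Perm.refl _, ?_⟩
      intro j hj2 hjn
      exact hA j hj2 hjn (by omega)

lemma pvAt_append_lt (l m : List PyNode) (k : Nat) (h : k < l.length) :
    pvAt (l ++ m) k = pvAt l k := by
  simp [pvAt, List.getD_eq_getElem?_getD, List.getElem?_append_left h]

lemma pvAt_append_self (l : List PyNode) (a : PyNode) : pvAt (l ++ [a]) l.length = a := by
  simp [pvAt, List.getD_eq_getElem?_getD]

lemma pvReg_cons (st : List PyNode) (m : Nat) :
    pvReg st (m + 1) = pvAt st 1 :: (List.range' 2 m).map (fun j => pvAt st j) := by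
  simp [pvReg, List.range'_succ]

lemma pvRegion_min (st : List PyNode) (size : Nat) (h : pvHeap st size) (h0 : 0 < size) :
    pvV st 1 ∈ (pvReg st size).map pvGv ∧ ∀ y ∈ (pvReg st size).map pvGv, pvV st 1 ≤ y := by
  constructor
  · have : pvAt st 1 ∈ pvReg st size := by
      have := pvReg_getElem st size 0 h0
      exact this ▸ List.getElem_mem _
    exact List.mem_map.mpr ⟨pvAt st 1, this, rfl⟩
  · intro y hy
    obtain ⟨t, ht, rfl⟩ := List.mem_map.mp hy
    obtain ⟨p, hp, rfl⟩ := List.mem_iff_getElem.mp ht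
    have hp' : p < size := by simpa [pvReg_length] using hp
    rw [pvReg_getElem st size p hp']
    exact pvHeap_min st size h (p + 1) (by omega) (by omega)

-- the build phase: after inserting the first m values, indices 1..m are a heap whose
-- nodes are a permutation of the corresponding leaves
lemma pvBuild (Tab : List Int) : ∀ m, m ≤ Tab.length →
    (((List.range m).foldl (fun st i => pvAddToStack st (i + 1) (Tab.getD i 0))
        (List.replicate (Tab.length + 1) pvFresh)).length = Tab.length + 1) ∧
    (∀ k, m < k → k ≤ Tab.length →
      pvAt ((List.range m).foldl (fun st i => pvAddToStack st (i + 1) (Tab.getD i 0))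
        (List.replicate (Tab.length + 1) pvFresh)) k = pvFresh) ∧
    ((pvReg ((List.range m).foldl (fun st i => pvAddToStack st (i + 1) (Tab.getD i 0))
        (List.replicate (Tab.length + 1) pvFresh)) m).Perm ((Tab.take m).map pvLeaf)) ∧
    pvHeap ((List.range m).foldl (fun st i => pvAddToStack st (i + 1) (Tab.getD i 0))
        (List.replicate (Tab.length + 1) pvFresh)) m := by
  intro m
  induction m with
  | zero =>
    intro _
    refine ⟨by simp, ?_, by simp [pvReg], ?_⟩
    · intro k hk1 hk2
      simp only [List.range_zero, List.foldl_nil]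
      unfold pvAt
      rw [List.getD_eq_getElem?_getD, List.getElem?_replicate, if_pos (by omega)]
      rfl
    · intro j hj1 hj2; omega
  | succ m ihm =>
    intro hm1
    obtain ⟨ih1, ih2, ih3, ih4⟩ := ihm (by omega)
    set st := (List.range m).foldl (fun st i => pvAddToStack st (i + 1) (Tab.getD i 0))
        (List.replicate (Tab.length + 1) pvFresh) with hst
    have hfold : (List.range (m + 1)).foldl
        (fun st i => pvAddToStack st (i + 1) (Tab.getD i 0))
        (List.replicate (Tab.length + 1) pvFresh)
          = pvAddToStack st (m + 1) (Tab.getD m 0) := by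
      rw [List.range_succ, List.foldl_append, List.foldl_cons, List.foldl_nil]
    have hfresh : pvAt st (m + 1) = pvFresh := ih2 (m + 1) (by omega) (by omega)
    have hadd : pvAddToStack st (m + 1) (Tab.getD m 0)
        = pvSiftUp (st.set (m + 1) (pvLeaf (Tab.getD m 0))) (m + 1) := by
      unfold pvAddToStack
      rw [hfresh]
      rfl
    set st1 := st.set (m + 1) (pvLeaf (Tab.getD m 0)) with hst1
    have hlen1 : st1.length = Tab.length + 1 := by rw [hst1, List.length_set, ih1]
    have hat1 : ∀ x, pvAt st1 x = if x = m + 1 then pvLeaf (Tab.getD m 0) else pvAt st x :=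
      fun x => pvAt_set st (m + 1) x _ (by omega)
    have hspec := pvSiftUp_spec (m + 1) st1 (m + 1) (by omega) le_rfl (by omega)
      (by
        intro j hj2 hjn hji
        unfold pvV
        rw [hat1, hat1, if_neg (by omega), if_neg hji]
        exact ih4 j hj2 (by omega))
      (by intro j hj2 hjn hji _; omega)
    obtain ⟨s1, s2, s3, s4⟩ := hspec
    rw [hfold, hadd]
    refine ⟨by rw [s1, hlen1], ?_, ?_, s4⟩
    · intro k hk1 hk2
      rw [s2 k (Or.inr (by omega)), hat1, if_neg (by omega)]
      exact ih2 k (by omega) hk2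
    · have hregeq : pvReg st1 (m + 1) = pvReg st m ++ [pvLeaf (Tab.getD m 0)] := by
        rw [pvReg_succ]
        congr 1
        · exact pvReg_congr st1 st m (fun k hk1 hk2 => by rw [hat1, if_neg (by omega)])
        · rw [hat1, if_pos rfl]
      have htake : (Tab.take (m + 1)).map pvLeaf
          = (Tab.take m).map pvLeaf ++ [pvLeaf (Tab.getD m 0)] := by
        have hmn : m < Tab.length := by omega
        have hg : Tab.getD m 0 = Tab[m] := by
          rw [List.getD_eq_getElem?_getD, List.getElem?_eq_getElem hmn]
          rfl
        rw [hg, List.take_add_one, List.getElem?_eq_getElem hmn]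
        rw [Option.toList_some, List.map_append, List.map_cons, List.map_nil]
      rw [htake]
      exact (s3.trans (hregeq ▸ List.Perm.refl _)).trans (ih3.append_right _)

-- one merge iteration: it extracts the two minima x0 ≤ x1 of the heap region, links them
-- under a fresh node of val x0+x1, and the region shrinks by one
lemma pvMergeStep_spec (n k : Nat) (st : List PyNode) (hn : 2 ≤ n) (hk : k ≤ n - 2)
    (hlen : st.length = n + 1 + k) (hheap : pvHeap st (n - k))
    (hwf : ∀ t ∈ pvReg st (n - k), pvWfB t = true) :
    (pvMergeStep n st k).length = n + 1 + (k + 1) ∧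
    pvHeap (pvMergeStep n st k) (n - (k + 1)) ∧
    (∀ t ∈ pvReg (pvMergeStep n st k) (n - (k + 1)), pvWfB t = true) ∧
    ∃ x0 x1 rest,
      PySem.List.sorted ((pvReg st (n - k)).map pvGv) id = x0 :: x1 :: rest ∧
      ((pvReg (pvMergeStep n st k) (n - (k + 1))).map pvGv).Perm (rest ++ [x0 + x1]) ∧
      ((pvReg (pvMergeStep n st k) (n - (k + 1))).map pvIS).sum
        = ((pvReg st (n - k)).map pvIS).sum + (x0 + x1) := by
  obtain ⟨s', hs⟩ : ∃ s', n - k = s' + 2 := ⟨n - k - 2, by omega⟩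
  have hs1 : n - (k + 1) = s' + 1 := by omega
  have hdef : pvMergeStep n st k =
      pvPushDown (n - k)
        (pvSwap
          (pvPushDown (n - k) (pvSwap st 1 (n - k)) 1 (n - k) ++
            [PyNode.node (pvAt (pvPushDown (n - k) (pvSwap st 1 (n - k)) 1 (n - k)) 1)
              (pvAt (pvPushDown (n - k) (pvSwap st 1 (n - k)) 1 (n - k)) (n - k))
              (some (pvGv (pvAt (pvPushDown (n - k) (pvSwap st 1 (n - k)) 1 (n - k)) 1) +
                pvGv (pvAt (pvPushDown (n - k) (pvSwap st 1 (n - k)) 1 (n - k)) (n - k))))])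
          1
          ((pvPushDown (n - k) (pvSwap st 1 (n - k)) 1 (n - k) ++
            [PyNode.node (pvAt (pvPushDown (n - k) (pvSwap st 1 (n - k)) 1 (n - k)) 1)
              (pvAt (pvPushDown (n - k) (pvSwap st 1 (n - k)) 1 (n - k)) (n - k))
              (some (pvGv (pvAt (pvPushDown (n - k) (pvSwap st 1 (n - k)) 1 (n - k)) 1) +
                pvGv (pvAt (pvPushDown (n - k) (pvSwap st 1 (n - k)) 1 (n - k)) (n - k))))]).length
            - 1))
        1 (n - k) := rfl
  rw [hdef, hs1]
  set st1 := pvSwap st 1 (n - k) with hst1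
  set st2 := pvPushDown (n - k) st1 1 (n - k) with hst2
  set x := pvAt st2 1 with hx
  set y := pvAt st2 (n - k) with hy
  set item := PyNode.node x y (some (pvGv x + pvGv y)) with hitem
  set st3 := st2 ++ [item] with hst3
  set st4 := pvSwap st3 1 (st3.length - 1) with hst4
  set st5 := pvPushDown (n - k) st4 1 (n - k) with hst5
  have hlen1 : st1.length = st.length := pvSwap_length st 1 (n - k)
  have hat1 : ∀ z, pvAt st1 z =
      if z = n - k then pvAt st 1 else if z = 1 then pvAt st (n - k) else pvAt st z :=
    fun z => pvAt_swap st 1 (n - k) z (by omega) (by omega)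
  obtain ⟨p1len, p1un, p1perm, p1heap⟩ := pvPushDown_spec (n - k) st1 1 (n - k)
    (by omega) (by omega) (by omega) (by omega)
    (by
      intro j hj2 hjs hjp
      unfold pvV
      rw [hat1, hat1, if_neg (by omega), if_neg (by omega), if_neg (by omega),
        if_neg (by omega)]
      exact hheap j hj2 (by omega))
    (by intro j _ _ _ h2; omega)
  rw [← hst2] at p1len p1un p1perm p1heap
  have hns1 : n - k - 1 = s' + 1 := by omega
  rw [hns1] at p1perm p1heap
  have hlen2 : st2.length = st.length := by rw [p1len, hlen1]
  -- region decompositions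
  set T := (List.range' 2 s').map (fun j => pvAt st j) with hT
  set T2 := (List.range' 2 s').map (fun j => pvAt st2 j) with hT2
  have hE1 : pvAt st1 1 = pvAt st (n - k) := by
    rw [hat1, if_neg (by omega), if_pos rfl]
  have hB0 : pvAt st1 (n - k) = pvAt st 1 := by rw [hat1, if_pos rfl]
  have hregst : pvReg st (n - k) = (pvAt st 1 :: T) ++ [pvAt st (n - k)] := by
    rw [hs, pvReg_succ, pvReg_cons]
  have hregst1 : pvReg st1 (s' + 1) = pvAt st (n - k) :: T := by
    rw [pvReg_cons, hE1]
    congr 1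
    apply List.map_congr_left
    intro j hj
    rw [List.mem_range'] at hj
    rw [hat1, if_neg (by omega), if_neg (by omega)]
  have hregst2 : pvReg st2 (s' + 1) = x :: T2 := by
    rw [pvReg_cons, ← hx]
  have hperm2 : (pvReg st2 (s' + 1)).Perm (pvAt st (n - k) :: T) := by
    rw [← hregst1]; exact p1perm
  -- the two minima
  have hVlen : ((pvReg st (n - k)).map pvGv).length = s' + 2 := by
    rw [List.length_map, pvReg_length, hs]
  obtain ⟨x0, x1, rest, hsort⟩ : ∃ x0 x1 rest,
      PySem.List.sorted ((pvReg st (n - k)).map pvGv) id = x0 :: x1 :: rest := by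
    rcases hq : PySem.List.sorted ((pvReg st (n - k)).map pvGv) id with _ | ⟨a, _ | ⟨b, r⟩⟩
    · have := (PySem.List.sorted_perm ((pvReg st (n - k)).map pvGv) id false).length_eq
      rw [hq, hVlen] at this; simp at this
    · have := (PySem.List.sorted_perm ((pvReg st (n - k)).map pvGv) id false).length_eq
      rw [hq, hVlen] at this; simp at this
    · exact ⟨a, b, r, rfl⟩
  have hVperm : ((pvReg st (n - k)).map pvGv).Perm (x0 :: x1 :: rest) := by
    rw [← hsort]
    exact (PySem.List.sorted_perm ((pvReg st (n - k)).map pvGv) id false).symm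
  have hVpair : (x0 :: x1 :: rest).Pairwise (· ≤ ·) := by
    have := PySem.List.sorted_pairwise ((pvReg st (n - k)).map pvGv) id
    rw [hsort] at this
    exact this
  have hmin0 := pvRegion_min st (n - k) hheap (by omega)
  have hx0 : pvV st 1 = x0 := pvMin_head hmin0.1 hmin0.2 hVperm hVpair
  -- value multiset after the first extraction
  have hVsplit : (pvReg st (n - k)).map pvGv
      = x0 :: (T.map pvGv ++ [pvGv (pvAt st (n - k))]) := by
    rw [hregst]
    simp only [List.map_append, List.map_cons, List.map_nil]
    rw [show pvGv (pvAt st 1) = x0 from hx0]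
    rfl
  have htailperm : (pvGv (pvAt st (n - k)) :: T.map pvGv).Perm (x1 :: rest) := by
    apply List.Perm.cons_inv (a := x0)
    have s1 : (x0 :: pvGv (pvAt st (n - k)) :: T.map pvGv).Perm
        (x0 :: (T.map pvGv ++ [pvGv (pvAt st (n - k))])) :=
      List.Perm.cons x0 (List.perm_append_singleton _ _).symm
    rw [← hVsplit] at s1
    exact s1.trans hVperm
  have hmin2 := pvRegion_min st2 (s' + 1) p1heap (by omega)
  have hx1 : pvGv x = x1 := by
    have hp : ((pvReg st2 (s' + 1)).map pvGv).Perm (x1 :: rest) :=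
      (hperm2.map pvGv).trans (by simpa using htailperm)
    exact pvMin_head hmin2.1 hmin2.2 hp (List.pairwise_cons.mp hVpair).2
  have hy0 : pvGv y = x0 := by
    have : y = pvAt st 1 := by
      rw [hy, p1un (n - k) (Or.inr le_rfl), hB0]
    rw [this]
    exact hx0
  -- wf facts
  have hwfmem : ∀ t, t ∈ pvAt st (n - k) :: T → pvWfB t = true := by
    intro t ht
    apply hwf
    rw [hregst]
    rcases List.mem_cons.mp ht with rfl | ht
    · simp
    · simp [ht]
  have hwfx : pvWfB x = true := by
    apply hwfmem
    apply hperm2.mem_iff.mp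
    rw [hregst2]
    exact List.mem_cons_self
  have hwfy : pvWfB y = true := by
    apply hwf
    rw [hregst]
    have : y = pvAt st 1 := by rw [hy, p1un (n - k) (Or.inr le_rfl), hB0]
    rw [this]
    simp
  obtain ⟨hwfitem, hISitem⟩ := pvWf_item hwfx hwfy
  -- state 4
  have hlen3 : st3.length = st.length + 1 := by rw [hst3, List.length_append, hlen2]; rfl
  have hat4 : ∀ z, z ≤ s' + 1 → pvAt st4 z = if z = 1 then item else pvAt st2 z := by
    intro z hz
    rw [hst4, pvAt_swap st3 1 (st3.length - 1) z (by omega) (by omega)]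
    rw [if_neg (by omega)]
    rcases eq_or_ne z 1 with rfl | hz1
    · rw [if_pos rfl, if_pos rfl]
      have : st3.length - 1 = st2.length := by rw [hlen3, hlen2]; omega
      rw [this, hst3, pvAt_append_self]
    · rw [if_neg hz1, if_neg hz1, hst3, pvAt_append_lt]
      omega
  obtain ⟨p2len, p2un, p2perm, p2heap⟩ := pvPushDown_spec (n - k) st4 1 (n - k)
    (by omega) (by omega) (by rw [hst4, pvSwap_length, hlen3]; omega) (by omega)
    (by
      intro j hj2 hjs hjp
      unfold pvV
      rw [hat4 (j / 2) (by omega), hat4 j (by omega), if_neg (by omega), if_neg (by omega)]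
      exact p1heap j hj2 (by omega))
    (by intro j _ _ _ h2; omega)
  rw [← hst5] at p2len p2un p2perm p2heap
  rw [hns1] at p2perm p2heap
  have hregst4 : pvReg st4 (s' + 1) = item :: T2 := by
    rw [pvReg_cons]
    rw [hat4 1 (by omega), if_pos rfl]
    congr 1
    apply List.map_congr_left
    intro j hj
    rw [List.mem_range'] at hj
    rw [hat4 j (by omega), if_neg (by omega)]
  have hfinperm : (pvReg st5 (s' + 1)).Perm (item :: T2) := by
    rw [← hregst4]; exact p2perm
  have hT2perm : (T2.map pvGv).Perm rest := by
    apply List.Perm.cons_inv (a := x1)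
    have h1 : ((pvReg st2 (s' + 1)).map pvGv).Perm (x1 :: rest) :=
      (hperm2.map pvGv).trans (by simpa using htailperm)
    have h2 : x1 :: T2.map pvGv = (pvReg st2 (s' + 1)).map pvGv := by
      rw [hregst2]; simp [hx1]
    rw [h2]
    exact h1
  have hgvitem : pvGv item = x0 + x1 := by
    rw [hitem]
    show pvGv x + pvGv y = x0 + x1
    rw [hx1, hy0]; ring
  refine ⟨?_, p2heap, ?_, x0, x1, rest, hsort, ?_, ?_⟩
  · rw [p2len, hst4, pvSwap_length, hlen3, hlen]
    omega
  · intro t ht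
    rcases List.mem_cons.mp (hfinperm.mem_iff.mp ht) with rfl | ht2
    · exact hwfitem
    · apply hwfmem
      apply hperm2.mem_iff.mp
      rw [hregst2]
      exact List.mem_cons_of_mem _ (by
        rw [hT2] at ht2
        exact ht2)
  · refine (hfinperm.map pvGv).trans ?_
    have g1 : (item :: T2).map pvGv = pvGv item :: T2.map pvGv := rfl
    rw [g1, hgvitem]
    exact (List.Perm.cons _ hT2perm).trans (List.perm_append_singleton _ _).symm
  · have e1 : ((pvReg st5 (s' + 1)).map pvIS).sum = ((item :: T2).map pvIS).sum :=
      (hfinperm.map pvIS).sum_eq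
    have e2 : ((pvReg st2 (s' + 1)).map pvIS).sum
        = ((pvAt st (n - k) :: T).map pvIS).sum := (hperm2.map pvIS).sum_eq
    have e3 : ((pvReg st2 (s' + 1)).map pvIS).sum = pvIS x + (T2.map pvIS).sum := by
      rw [hregst2]; simp
    have e4 : ((pvReg st (n - k)).map pvIS).sum
        = pvIS (pvAt st 1) + (T.map pvIS).sum + pvIS (pvAt st (n - k)) := by
      rw [hregst]; simp; ring
    have e5 : y = pvAt st 1 := by rw [hy, p1un (n - k) (Or.inr le_rfl), hB0]
    have e6 : ((pvAt st (n - k) :: T).map pvIS).sum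
        = pvIS (pvAt st (n - k)) + (T.map pvIS).sum := by simp
    rw [e1]
    have e7 : ((item :: T2).map pvIS).sum = pvIS item + (T2.map pvIS).sum := by simp
    rw [e7, hISitem, hx1, hy0, e4, ← e5]
    have : pvIS x + (T2.map pvIS).sum = pvIS (pvAt st (n - k)) + (T.map pvIS).sum := by
      rw [← e3, e2, e6]
    omega

-- the merge loop: the region stays a heap of well-formed trees, and the sum of internal
-- vals plus the remaining cost of B's loop on the region's values is invariant
lemma pvMerge (Tab : List Int) (st1 : List PyNode) (hn : 2 ≤ Tab.length)
    (hlen : st1.length = Tab.length + 1)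
    (hperm : (pvReg st1 Tab.length).Perm (Tab.map pvLeaf))
    (hheap : pvHeap st1 Tab.length) :
    ∀ k, k ≤ Tab.length - 1 →
    ((List.range k).foldl (pvMergeStep Tab.length) st1).length = Tab.length + 1 + k ∧
    pvHeap ((List.range k).foldl (pvMergeStep Tab.length) st1) (Tab.length - k) ∧
    (∀ t ∈ pvReg ((List.range k).foldl (pvMergeStep Tab.length) st1) (Tab.length - k),
      pvWfB t = true) ∧
    ((pvReg ((List.range k).foldl (pvMergeStep Tab.length) st1) (Tab.length - k)).map pvIS).sum
      + pvT (Tab.length - k)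
        ((pvReg ((List.range k).foldl (pvMergeStep Tab.length) st1) (Tab.length - k)).map pvGv)
      = pvT Tab.length Tab := by
  intro k
  induction k with
  | zero =>
    intro _
    simp only [List.range_zero, List.foldl_nil, Nat.sub_zero]
    refine ⟨by omega, hheap, ?_, ?_⟩
    · intro t ht
      obtain ⟨v, _, rfl⟩ := List.mem_map.mp (hperm.mem_iff.mp ht)
      rfl
    · have e1 : ((pvReg st1 Tab.length).map pvIS).sum = ((Tab.map pvLeaf).map pvIS).sum :=
        (hperm.map pvIS).sum_eq
      have e2 : ((Tab.map pvLeaf).map pvIS).sum = 0 := by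
        have h : List.map pvIS (List.map pvLeaf Tab) = List.map (fun _ => (0 : Int)) Tab := by
          rw [List.map_map]; rfl
        rw [h]
        simp
      have e3 : ((Tab.map pvLeaf).map pvGv) = Tab := by
        have h : List.map pvGv (List.map pvLeaf Tab) = List.map (fun v : Int => v) Tab := by
          rw [List.map_map]; rfl
        rw [h, List.map_id']
      have e4 : pvT Tab.length ((pvReg st1 Tab.length).map pvGv) = pvT Tab.length Tab := by
        rw [pvT_perm Tab.length (hperm.map pvGv), e3]
      rw [e1, e2, e4]
      omega
  | succ k ihk =>
    intro hk1
    obtain ⟨ih1, ih2, ih3, ih4⟩ := ihk (by omega)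
    have hfold : (List.range (k + 1)).foldl (pvMergeStep Tab.length) st1
        = pvMergeStep Tab.length ((List.range k).foldl (pvMergeStep Tab.length) st1) k := by
      rw [List.range_succ, List.foldl_append, List.foldl_cons, List.foldl_nil]
    set stk := (List.range k).foldl (pvMergeStep Tab.length) st1 with hstk
    obtain ⟨m1, m2, m3, x0, x1, rest, msort, mperm, msum⟩ :=
      pvMergeStep_spec Tab.length k stk hn (by omega) ih1 ih2 ih3
    rw [hfold]
    refine ⟨m1, m2, m3, ?_⟩
    have hVlen : ((pvReg stk (Tab.length - k)).map pvGv).length = Tab.length - k := by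
      rw [List.length_map, pvReg_length]
    obtain ⟨m', hm⟩ : ∃ m', Tab.length - k = m' + 2 := ⟨Tab.length - k - 2, by omega⟩
    have hfuel : Tab.length - (k + 1) = m' + 1 := by omega
    have hT2 : pvT (Tab.length - k) ((pvReg stk (Tab.length - k)).map pvGv)
        = (x0 + x1) + pvT (m' + 1) (rest ++ [x0 + x1]) := by
      have hgoal : pvT (Tab.length - k) ((pvReg stk (Tab.length - k)).map pvGv)
          = pvT (m' + 2) ((pvReg stk (Tab.length - k)).map pvGv) := by rw [hm]
      rw [hgoal, pvT, if_pos (by rw [hVlen]; omega), msort]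
    have hT1 : pvT (Tab.length - (k + 1))
        ((pvReg (pvMergeStep Tab.length stk k) (Tab.length - (k + 1))).map pvGv)
        = pvT (m' + 1) (rest ++ [x0 + x1]) := by
      rw [pvT_perm _ mperm, hfuel]
    rw [hT1, msum]
    rw [hT2] at ih4
    omega

theorem huffman_len_spec : Claim_equal_huffman_len := by
  unfold Claim_equal_huffman_len
  intro Tab _ hpre
  unfold Spec_huffman_len
  have hne : Tab.length ≠ 0 := fun h => hpre (List.length_eq_zero_iff.mp h)
  by_cases h1 : Tab.length = 1
  · unfold huffman_len huffman_len_alt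
    rw [if_pos h1, if_pos h1]
  · have hB : huffman_len_alt Tab = pvBLoop Tab 0 Tab.length := by
      unfold huffman_len_alt
      rw [if_neg h1]
    have hA : huffman_len Tab = pvDfsCount (pvAt ((List.range
        (((List.range Tab.length).foldl (fun st i => pvAddToStack st (i + 1) (Tab.getD i 0)) (List.replicate (Tab.length + 1) pvFresh)).length - 1 - 1)).foldl (pvMergeStep (((List.range Tab.length).foldl (fun st i => pvAddToStack st (i + 1) (Tab.getD i 0)) (List.replicate (Tab.length + 1) pvFresh)).length - 1)) ((List.range Tab.length).foldl (fun st i => pvAddToStack st (i + 1) (Tab.getD i 0)) (List.replicate (Tab.length + 1) pvFresh))) 1) 0 := by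
      unfold huffman_len
      rw [if_neg h1]
    rw [hA, hB]
    have hn : 2 ≤ Tab.length := by omega
    obtain ⟨b1, b2, b3, b4⟩ := pvBuild Tab Tab.length le_rfl
    rw [List.take_length] at b3
    set stB := ((List.range Tab.length).foldl (fun st i => pvAddToStack st (i + 1) (Tab.getD i 0)) (List.replicate (Tab.length + 1) pvFresh)) with hstB
    have hL : stB.length - 1 = Tab.length := by rw [b1]; omega
    rw [hL]
    obtain ⟨f1, f2, f3, f4⟩ := pvMerge Tab stB hn b1 b3 b4 (Tab.length - 1) le_rfl
    set stF := (List.range (Tab.length - 1)).foldl (pvMergeStep Tab.length) stB with hstF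
    have h11 : Tab.length - (Tab.length - 1) = 1 := by omega
    rw [h11] at f2 f3 f4
    have hreg1 : pvReg stF 1 = [pvAt stF 1] := by
      simp [pvReg, List.range']
    have hwfroot : pvWfB (pvAt stF 1) = true := by
      apply f3
      rw [hreg1]
      exact List.mem_singleton.mpr rfl
    have hT1 : pvT 1 [pvGv (pvAt stF 1)] = 0 := by
      simp [pvT]
    rw [hreg1] at f4
    simp only [List.map_cons, List.map_nil, List.sum_cons, List.sum_nil, hT1] at f4
    rw [pvBLoop_eq, pvDfs_eq _ hwfroot]
    omega
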